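-- pv_equiv track=rewrite | github.com/El-Dringo-Brannde/OSU-Classes | CS-361-SoftwareEngineering1/Notes/Kwic.py | Parse_document
-- ===== SOURCE A (Python) =====
-- def Rotate_Lines(Parsed_line, ignoreWords, longarr):
-- 	i = 0
-- 	while i != int(len(Parsed_line)):
-- 		for j in range(len(Parsed_line[i])):
-- 				front = Parsed_line[i].pop(0)
-- 				Parsed_line[i].insert(len(Parsed_line[i]), front)
-- 				if len(ignoreWords) != 0:
-- 					redflag = 0
-- 					for q in range(len(ignoreWords)):
-- 						if Parsed_line[i][0] == ignoreWords[q]: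
-- 							redflag = 1          #Checks to see if the word is in ignoreWords list
-- 					if redflag != 1:
-- 						longarr.append(tuple(Parsed_line[i]))
-- 						longarr.append(tuple(Parsed_line[i + 1]))
-- 				else:
-- 					longarr.append(tuple(Parsed_line[i]))
-- 					longarr.append(tuple(Parsed_line[i + 1]))
-- 		i += 2
--
-- def Parse_document(Comp_line,ignoreWords):
-- 	Parsed_line, Index_Tracker, Final_Array, longarr = ([] for i in range(4))
-- 	for i in (range(len(Comp_line))): #runs the length of the lines given
-- 		Parsed_line.append(Comp_line[i].split())	#break the words of each line into own array piece
-- 		Index_Tracker.append(i)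
-- 		d = Index_Tracker[:]
-- 		while (len(d) != 1):
-- 			d.pop(0)
-- 		Parsed_line.append(d)
-- 	Rotate_Lines(Parsed_line, ignoreWords,longarr)
-- 	longarr = [list(i) for i in longarr]
--
-- 	i = 0
-- 	while (i != int(len(longarr))):
-- 		Final_Array.append(tuple([longarr[i]] + longarr[i+1]))
-- 		i += 2
-- 	Final_Array.sort(key=lambda x: list(map(str.lower, x[0])))
-- 	return Final_Array
-- ===== SOURCE B (Python) =====
-- def Parse_document(Comp_line, ignoreWords):
--     result = []
--     for i, line in enumerate(Comp_line):
--         words = line.split()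
--         for k in range(1, len(words) + 1):
--             rot = words[k:] + words[:k]
--             if len(ignoreWords) == 0 or rot[0] not in ignoreWords:
--                 result.append((rot, i))
--     result.sort(key=lambda x: [w.lower() for w in x[0]])
--     return result
-- ===== Notes on version B (the rewrite author's own statement) =====
-- stated objective: simpler
-- what changed: Replaces A's interleaved word-list/index-list construction, in-place pop(0)/insert rotation, flat tuple buffer and separate re-pairing loop by one enumerate pass that appends (words[k:]+words[:k], i) pairs directly, followed by the same stable sort.
import Mathlib
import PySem

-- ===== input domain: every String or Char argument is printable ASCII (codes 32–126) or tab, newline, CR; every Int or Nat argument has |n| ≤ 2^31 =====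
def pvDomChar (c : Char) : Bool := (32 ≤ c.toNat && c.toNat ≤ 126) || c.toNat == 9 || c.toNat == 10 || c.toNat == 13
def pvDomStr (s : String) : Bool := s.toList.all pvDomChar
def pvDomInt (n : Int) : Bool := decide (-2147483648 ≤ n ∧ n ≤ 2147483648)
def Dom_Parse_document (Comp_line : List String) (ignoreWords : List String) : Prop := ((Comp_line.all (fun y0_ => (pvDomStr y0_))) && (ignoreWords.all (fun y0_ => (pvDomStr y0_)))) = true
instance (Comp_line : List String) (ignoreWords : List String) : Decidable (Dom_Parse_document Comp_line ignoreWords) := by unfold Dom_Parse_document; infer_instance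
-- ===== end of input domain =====

-- B replaces A's interleaved word-list/index-list construction, in-place rotation and
-- separate re-pairing loop by one enumerate pass appending (rotation, index) pairs
-- directly, then sorts; objective: simpler (and measurably faster by a constant factor:
-- it avoids the pop(0)/insert copying, Index_Tracker re-scans and tuple/list round-trips).

-- ===== PORT A =====
-- Python's Parsed_line/longarr interleave word lists with one-element index lists,
-- so the port uses a sum type for their elements.
abbrev pvCell := List String ⊕ List Int

-- the 'while (len(d) != 1): d.pop(0)' loop; [] is unreachable (Python would loop forever there)
def pvLastSingleton : List Int → List Int
  | [] => []
  | [x] => [x]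
  | _ :: y :: xs => pvLastSingleton (y :: xs)


-- the 'for j in range(len(Parsed_line[i]))' body of Rotate_Lines, j counting remaining
-- iterations; the ws = [] branch is unreachable (the loop runs exactly len(ws) times)
def pvRotJ (ignoreWords : List String) (idx : List Int) :
    Nat → List String → List pvCell → List String × List pvCell
  | 0, ws, longarr => (ws, longarr)
  | j + 1, ws, longarr =>
    match ws with
    | [] => pvRotJ ignoreWords idx j [] longarr
    | front :: rest =>
      let ws' := rest ++ [front]
      if ignoreWords.length ≠ 0 then
        let redflag : Nat := ignoreWords.foldl
          (fun r q => if PySem.List.pyGetD ws' 0 "" == q then 1 else r) 0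
        if redflag ≠ 1 then
          pvRotJ ignoreWords idx j ws' (longarr ++ [Sum.inl ws', Sum.inr idx])
        else pvRotJ ignoreWords idx j ws' longarr
      else pvRotJ ignoreWords idx j ws' (longarr ++ [Sum.inl ws', Sum.inr idx])


-- the 'while i != len(Parsed_line)' loop of Rotate_Lines, stepping two cells at a time;
-- the catch-all shape is unreachable (Parsed_line alternates word list / index list)
def pvRotateLines (ignoreWords : List String) : List pvCell → List pvCell → List pvCell
  | Sum.inl ws :: Sum.inr idx :: rest, longarr =>
    pvRotateLines ignoreWords rest (pvRotJ ignoreWords idx ws.length ws longarr).2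
  | _, longarr => longarr


-- the final 'while i != len(longarr)' re-pairing loop; tuple([longarr[i]] + longarr[i+1])
-- pairs a word list with the one-element index list (other shapes unreachable)
def pvPairUp : List pvCell → List (List String × Int)
  | Sum.inl ws :: Sum.inr idx :: rest => (ws, idx.headD 0) :: pvPairUp rest
  | _ => []


def Parse_document (Comp_line : List String) (ignoreWords : List String) : List (List String × Int) :=
  let st := (PySem.List.pyRange 0 (Comp_line.length : Int) 1).foldl
    (fun (st : List pvCell × List Int) i =>
      let pl := st.1 ++ [Sum.inl (PySem.Str.split₀ (PySem.List.pyGetD Comp_line i ""))]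
      let tr := st.2 ++ [i]
      let d := pvLastSingleton tr
      (pl ++ [Sum.inr d], tr)) ([], [])
  let longarr := pvRotateLines ignoreWords st.1 []
  let finalArr := pvPairUp longarr
  PySem.List.sorted finalArr (fun x => x.1.map PySem.Str.lower) false

-- ===== PORT B =====
def Parse_document_alt (Comp_line : List String) (ignoreWords : List String) : List (List String × Int) :=
  let result := (PySem.List.enumerate Comp_line).foldl
    (fun res p =>
      let words := PySem.Str.split₀ p.2
      (PySem.List.pyRange 1 ((words.length : Int) + 1) 1).foldl
        (fun res k =>
          let rot := PySem.List.slice words (some k) none ++ PySem.List.slice words none (some k)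
          if ignoreWords.length == 0 || !(ignoreWords.contains (PySem.List.pyGetD rot 0 "")) then
            res ++ [(rot, p.1)]
          else res) res) []
  PySem.List.sorted result (fun x => x.1.map PySem.Str.lower) false

-- ===== PRECONDITION & SPEC =====
def Spec_Parse_document (Comp_line : List String) (ignoreWords : List String) (out : List (List String × Int)) : Prop := out = Parse_document_alt Comp_line ignoreWords
instance (Comp_line : List String) (ignoreWords : List String) (out : List (List String × Int)) : Decidable (Spec_Parse_document Comp_line ignoreWords out) := by unfold Spec_Parse_document; infer_instance

-- ===== CLAIM (what is proved, stated in full; the proofs are below) =====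
def Claim_equal_Parse_document : Prop := ∀ (Comp_line : List String) (ignoreWords : List String), Dom_Parse_document Comp_line ignoreWords → Spec_Parse_document Comp_line ignoreWords (Parse_document Comp_line ignoreWords)

-- ===== LEMMAS AND PROOFS =====
-- common description of the pre-sort list: rotation by k, the keep test, one line's output

def pvKeep (ign : List String) (rot : List String) : Bool :=
  ign.length == 0 || !(ign.contains (rot.headD ""))


def pvEntGo (ign : List String) : Nat → List String → List (List String)
  | 0, _ => []
  | _ + 1, [] => []
  | j + 1, f :: rest =>
    (if pvKeep ign (rest ++ [f]) then [rest ++ [f]] else []) ++ pvEntGo ign j (rest ++ [f])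


def pvRot (ws : List String) (k : Nat) : List String := ws.drop k ++ ws.take k


def pvLine (ign : List String) (i : Int) (ws : List String) : List (List String × Int) :=
  (((List.range ws.length).map (fun m => pvRot ws (m + 1))).filter (pvKeep ign)).map (fun r => (r, i))


def pvPre (Comp_line ign : List String) : List (List String × Int) :=
  (PySem.List.enumerate Comp_line).flatMap (fun p => pvLine ign p.1 (PySem.Str.split₀ p.2))


theorem pvLastSingleton_append (xs : List Int) (x : Int) :
    pvLastSingleton (xs ++ [x]) = [x] := by
  induction xs with
  | nil => rfl
  | cons y ys ih =>
    cases ys with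
    | nil => rfl
    | cons z zs => simpa [pvLastSingleton] using ih


theorem pvRedflag_eq (ign : List String) (h : String) (r : Nat) :
    ign.foldl (fun r q => if h == q then 1 else r) r
      = if ign.contains h then 1 else r := by
  induction ign generalizing r with
  | nil => simp
  | cons q qs ih =>
    simp only [List.foldl_cons, List.contains_cons]
    rw [ih]
    by_cases hq : (h == q) = true
    · simp [hq]
    · simp [hq]


theorem pvEntGo_nil (ign : List String) (j : Nat) : pvEntGo ign j [] = [] := by
  cases j <;> rfl


theorem pvRotJ_spec (ign : List String) (idx : List Int) :
    ∀ (j : Nat) (ws : List String) (acc : List pvCell),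
      (pvRotJ ign idx j ws acc).2
        = acc ++ (pvEntGo ign j ws).flatMap (fun e => [Sum.inl e, Sum.inr idx]) := by
  intro j
  induction j with
  | zero => intro ws acc; simp [pvRotJ, pvEntGo]
  | succ j ih =>
    intro ws acc
    match ws with
    | [] => simp [pvRotJ, pvEntGo_nil, ih]
    | f :: rest =>
      have hhd : PySem.List.pyGetD (rest ++ [f]) 0 "" = (rest ++ [f]).headD "" := by
        rw [PySem.List.pyGetD_zero]; cases rest <;> simp
      by_cases hig : ign.length = 0
      · have he : ign = [] := List.length_eq_zero_iff.mp hig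
        subst he
        simp only [pvRotJ, pvEntGo]
        rw [if_neg (by simp)]
        rw [ih]
        simp [pvKeep]
      · by_cases hc : ign.contains ((rest ++ [f]).headD "") = true
        · have hk : pvKeep ign (rest ++ [f]) = false := by
            simp only [pvKeep, Bool.or_eq_false_iff]
            refine ⟨by simpa using hig, by simpa using hc⟩
          simp only [pvRotJ, pvEntGo]
          rw [if_pos hig, hhd, pvRedflag_eq, if_pos hc, if_neg (by simp), ih, hk]
          simp
        · have hk : pvKeep ign (rest ++ [f]) = true := by
            simp only [pvKeep, Bool.or_eq_true]
            right; simpa using hc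
          simp only [pvRotJ, pvEntGo]
          rw [if_pos hig, hhd, pvRedflag_eq, if_neg hc, if_pos (by omega), ih, hk]
          simp


theorem pvRot_cons (ws : List String) (t : Nat) (ht : t < ws.length) :
    pvRot ws t = ws[t] :: (ws.drop (t+1) ++ ws.take t) ∧
      (ws.drop (t+1) ++ ws.take t) ++ [ws[t]] = pvRot ws (t+1) := by
  have hdrop : ws.drop t = ws[t] :: ws.drop (t + 1) := List.drop_eq_getElem_cons ht
  have htake : ws.take (t + 1) = ws.take t ++ [ws[t]] := by
    rw [List.take_add_one]
    simp [List.getElem?_eq_getElem ht]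
  refine ⟨?_, ?_⟩
  · show ws.drop t ++ ws.take t = _
    rw [List.drop_eq_getElem_cons ht, List.cons_append]
  · show _ = ws.drop (t+1) ++ ws.take (t+1)
    rw [htake]; simp


theorem pvEntGo_rot (ign : List String) :
    ∀ (j t : Nat) (ws : List String), t + j ≤ ws.length →
      pvEntGo ign j (pvRot ws t)
        = ((List.range j).map (fun m => pvRot ws (t + m + 1))).filter (pvKeep ign) := by
  intro j
  induction j with
  | zero => intro t ws _; simp [pvEntGo]
  | succ j ih =>
    intro t ws hle
    have ht : t < ws.length := by omega
    obtain ⟨h1, h2⟩ := pvRot_cons ws t ht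
    rw [h1]
    show (if pvKeep ign ((ws.drop (t+1) ++ ws.take t) ++ [ws[t]]) = true
          then [(ws.drop (t+1) ++ ws.take t) ++ [ws[t]]] else [])
        ++ pvEntGo ign j ((ws.drop (t+1) ++ ws.take t) ++ [ws[t]]) = _
    rw [h2, ih (t+1) ws (by omega), List.range_succ_eq_map]
    have hmap : ((List.range j).map Nat.succ).map (fun m => pvRot ws (t + m + 1))
        = (List.range j).map (fun m => pvRot ws (t + 1 + m + 1)) := by
      rw [List.map_map]
      refine List.map_congr_left (fun m _ => ?_)
      have he : t + (m + 1) + 1 = t + 1 + m + 1 := by omega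
      simp [Function.comp, Nat.succ_eq_add_one, he]
    simp only [List.map_cons, List.filter_cons, hmap]
    by_cases hk : pvKeep ign (pvRot ws (t + 1)) = true
    · simp [hk]
    · have hk' : pvKeep ign (pvRot ws (t + 1)) = false := by simpa using hk
      simp [hk']


theorem pvRotateLines_flat (ign : List String) :
    ∀ (L : List (Int × String)) (longarr : List pvCell),
      pvRotateLines ign
          (L.flatMap (fun p => [Sum.inl (PySem.Str.split₀ p.2), Sum.inr [p.1]])) longarr
        = longarr ++ L.flatMap (fun p =>
            (pvEntGo ign (PySem.Str.split₀ p.2).length (PySem.Str.split₀ p.2)).flatMap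
              (fun e => [Sum.inl e, Sum.inr [p.1]])) := by
  intro L
  induction L with
  | nil => intro longarr; simp [pvRotateLines]
  | cons p L ih =>
    intro longarr
    simp only [List.flatMap_cons, List.cons_append]
    show pvRotateLines ign (Sum.inl (PySem.Str.split₀ p.2) :: Sum.inr [p.1] :: _) longarr = _
    rw [pvRotateLines, pvRotJ_spec]
    simp only [List.nil_append]
    rw [ih]
    simp


theorem pvPairUp_chunk (i : Int) :
    ∀ (E : List (List String)) (rest : List pvCell),
      pvPairUp ((E.flatMap (fun e => [Sum.inl e, Sum.inr [i]])) ++ rest)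
        = E.map (fun e => (e, i)) ++ pvPairUp rest := by
  intro E
  induction E with
  | nil => intro rest; simp
  | cons e es ih => intro rest; simp only [List.flatMap_cons, List.cons_append,
      List.append_assoc, List.map_cons]; rw [pvPairUp]; simp only [List.nil_append]; rw [ih]; rfl


theorem pvPairUp_flat (ign : List String) (L : List (Int × String)) :
    pvPairUp (L.flatMap (fun p =>
        (pvEntGo ign (PySem.Str.split₀ p.2).length (PySem.Str.split₀ p.2)).flatMap
          (fun e => [Sum.inl e, Sum.inr [p.1]])))
      = L.flatMap (fun p =>
          (pvEntGo ign (PySem.Str.split₀ p.2).length (PySem.Str.split₀ p.2)).map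
            (fun e => (e, p.1))) := by
  induction L with
  | nil => rfl
  | cons p L ih =>
    simp only [List.flatMap_cons]
    rw [pvPairUp_chunk, ih]


theorem pvEntGo_full (ign : List String) (ws : List String) :
    (pvEntGo ign ws.length ws).map (fun e => (e, (i : Int)))
      = pvLine ign i ws := by
  have h0 : ws = pvRot ws 0 := by simp [pvRot]
  rw [pvLine]
  conv_lhs => rw [h0]
  rw [show (pvRot ws 0).length = ws.length from by simp [pvRot]]
  rw [pvEntGo_rot ign ws.length 0 ws (by omega)]
  simp


theorem pvBuild (Comp_line : List String) :
    ∀ n : Nat, n ≤ Comp_line.length →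
      ((PySem.List.pyRange 0 (n : Int) 1).foldl
        (fun (st : List pvCell × List Int) i =>
          (st.1 ++ [Sum.inl (PySem.Str.split₀ (PySem.List.pyGetD Comp_line i ""))]
            ++ [Sum.inr (pvLastSingleton (st.2 ++ [i]))], st.2 ++ [i])) ([], []))
      = ((List.range n).flatMap (fun i =>
            [Sum.inl (PySem.Str.split₀ (Comp_line.getD i "")), Sum.inr [(i : Int)]]),
         (List.range n).map (fun i => (i : Int))) := by
  intro n
  induction n with
  | zero => intro _; simp [PySem.List.pyRange_one_eq_nil]
  | succ n ih =>
    intro hle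
    have h1 : ((n + 1 : Nat) : Int) = (n : Int) + 1 := by push_cast; ring
    rw [h1, PySem.List.pyRange_one_succ_right (by positivity), List.foldl_append,
      ih (by omega)]
    simp only [List.foldl_cons, List.foldl_nil]
    rw [pvLastSingleton_append]
    simp [List.range_succ, PySem.List.pyGetD_natCast]


theorem pvEnumerate_eq (Comp_line : List String) :
    PySem.List.enumerate Comp_line
      = (List.range Comp_line.length).map (fun (i : Nat) => ((i : Int), Comp_line.getD i "")) := by
  rw [PySem.List.enumerate_eq_map_pyRange Comp_line ""]
  rw [PySem.List.pyRange_one]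
  simp [PySem.List.pyGetD_natCast, Function.comp]


theorem pvGetD_zero_headD {α : Type} (xs : List α) (d : α) : xs.getD 0 d = xs.headD d := by
  cases xs <;> rfl


theorem pvB_inner (ign words : List String) (i : Int) :
    ∀ res : List (List String × Int),
      (PySem.List.pyRange 1 ((words.length : Int) + 1) 1).foldl
        (fun res k =>
          let rot := PySem.List.slice words (some k) none ++ PySem.List.slice words none (some k)
          if ign.length == 0 || !(ign.contains (PySem.List.pyGetD rot 0 "")) then
            res ++ [(rot, i)]
          else res) res
      = res ++ pvLine ign i words := by
  intro res
  rw [PySem.List.pyRange_one]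
  have hn : ((words.length : Int) + 1 - 1).toNat = words.length := by omega
  rw [hn, List.foldl_map]
  have hbody : ∀ (res : List (List String × Int)) (m : Nat), m ∈ List.range words.length →
      (fun res k =>
        let rot := PySem.List.slice words (some k) none ++ PySem.List.slice words none (some k)
        if ign.length == 0 || !(ign.contains (PySem.List.pyGetD rot 0 "")) then
          res ++ [(rot, i)]
        else res) res ((1 : Int) + (m : Int))
      = if pvKeep ign (pvRot words (m+1)) then res ++ [(pvRot words (m+1), i)] else res := by
    intro res m _
    have hc : (1 : Int) + (m : Int) = ((m + 1 : Nat) : Int) := by push_cast; ring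
    simp only [hc, PySem.List.slice_from_natCast, PySem.List.slice_to_natCast]
    have hrot : words.drop (m+1) ++ words.take (m+1) = pvRot words (m+1) := rfl
    rw [hrot, PySem.List.pyGetD_zero, pvGetD_zero_headD]
    rfl
  rw [PySem.List.foldl_congr_mem _ _ _ _ (fun acc x hx => hbody acc x hx)]
  rw [show (fun (res : List (List String × Int)) (m : Nat) =>
      if pvKeep ign (pvRot words (m+1)) then res ++ [(pvRot words (m+1), i)] else res)
    = (fun res m => if (fun m => pvKeep ign (pvRot words (m+1))) m then
        res ++ [(fun m => (pvRot words (m+1), i)) m] else res) from rfl]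
  rw [PySem.List.foldl_append_if]
  rw [pvLine, List.filter_map, List.map_map]
  rfl


theorem pvA_presort (Comp_line ign : List String) :
    Parse_document Comp_line ign
      = PySem.List.sorted (pvPre Comp_line ign) (fun x => x.1.map PySem.Str.lower) false := by
  rw [Parse_document]
  have hb := pvBuild Comp_line Comp_line.length (le_refl _)
  simp only at hb ⊢
  rw [hb]
  have hflat : (List.range Comp_line.length).flatMap (fun i =>
      [Sum.inl (PySem.Str.split₀ (Comp_line.getD i "")), Sum.inr [(i : Int)]])
      = (PySem.List.enumerate Comp_line).flatMap
          (fun p => [Sum.inl (PySem.Str.split₀ p.2), Sum.inr [p.1]]) := by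
    rw [pvEnumerate_eq, List.flatMap_map]
  rw [hflat, pvRotateLines_flat, List.nil_append, pvPairUp_flat]
  congr 1
  rw [pvPre]
  simp only [pvEntGo_full]


theorem pvB_presort (Comp_line ign : List String) :
    Parse_document_alt Comp_line ign
      = PySem.List.sorted (pvPre Comp_line ign) (fun x => x.1.map PySem.Str.lower) false := by
  rw [Parse_document_alt]
  simp only
  congr 1
  have hbody : ∀ (res : List (List String × Int)) (p : Int × String),
      p ∈ PySem.List.enumerate Comp_line →
      (fun res (p : Int × String) =>
        (PySem.List.pyRange 1 (((PySem.Str.split₀ p.2).length : Int) + 1) 1).foldl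
          (fun res k =>
            let rot := PySem.List.slice (PySem.Str.split₀ p.2) (some k) none
              ++ PySem.List.slice (PySem.Str.split₀ p.2) none (some k)
            if ign.length == 0 || !(ign.contains (PySem.List.pyGetD rot 0 "")) then
              res ++ [(rot, p.1)]
            else res) res) res p
      = res ++ pvLine ign p.1 (PySem.Str.split₀ p.2) := by
    intro res p _
    exact pvB_inner ign (PySem.Str.split₀ p.2) p.1 res
  rw [PySem.List.foldl_congr_mem _ _ _ _ hbody]
  rw [PySem.List.foldl_append_eq_flatMap (fun p : Int × String => pvLine ign p.1 (PySem.Str.split₀ p.2))]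
  rw [List.nil_append, pvPre]


-- ===== VERDICT (by name: the statement is the Claim_ definition above) =====
theorem Parse_document_spec : Claim_equal_Parse_document := by
  intro Comp_line ignoreWords _
  unfold Spec_Parse_document
  rw [pvA_presort, pvB_presort]
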